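-- pv_equiv track=rewrite | github.com/12230563/codetree-TILs | 240121/ab 사이에 없는 c/c-between-a-and-b-2.py | ismultiple
-- ===== SOURCE A (Python) =====
-- def ismultiple(n1,n2,n3):
--     cout = 0
--
--     for i in range(n1,n2+1):
--         if i % n3 == 0:
--             cout += 1
--         else:
--             pass
--
--     if cout == 0:
--         return True
--     else:
--         return False
-- ===== SOURCE B (Python) =====
-- def ismultiple(n1, n2, n3):
--     # True iff no multiple of n3 lies in [n1, n2], by a closed-form count (O(1)).
--     if n1 > n2:
--         return True
--     m = abs(n3)
--     return n2 // m - (n1 - 1) // m == 0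
-- ===== Notes on version B (the rewrite author's own statement) =====
-- stated objective: faster
-- what changed: Replaces the per-element scan of range(n1, n2+1) with the closed-form multiple count n2//|n3| - (n1-1)//|n3| compared to zero.
import Mathlib
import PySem

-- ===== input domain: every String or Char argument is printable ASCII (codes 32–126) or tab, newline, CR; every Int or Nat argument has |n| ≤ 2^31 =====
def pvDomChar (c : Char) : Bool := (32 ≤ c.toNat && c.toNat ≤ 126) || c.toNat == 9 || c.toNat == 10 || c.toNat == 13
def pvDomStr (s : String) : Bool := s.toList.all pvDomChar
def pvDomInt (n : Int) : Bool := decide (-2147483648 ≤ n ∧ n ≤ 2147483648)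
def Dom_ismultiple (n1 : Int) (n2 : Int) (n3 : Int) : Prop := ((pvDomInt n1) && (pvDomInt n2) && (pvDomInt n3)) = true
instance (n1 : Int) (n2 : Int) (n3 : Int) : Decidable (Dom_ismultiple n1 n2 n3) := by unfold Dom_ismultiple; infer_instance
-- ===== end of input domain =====

-- B replaces A's O(n2-n1) scan of range(n1, n2+1) by the closed-form multiple count
-- n2//|n3| - (n1-1)//|n3| (objective: faster, asymptotic).


-- ===== PORT A =====
def ismultiple (n1 : Int) (n2 : Int) (n3 : Int) : Bool :=
  let cout : Int := (PySem.List.pyRange n1 (n2 + 1) 1).foldl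
    (fun c i => if PySem.Int.mod i n3 = 0 then c + 1 else c) 0
  if cout = 0 then true else false

-- ===== PORT B =====
def ismultiple_alt (n1 : Int) (n2 : Int) (n3 : Int) : Bool :=
  if n1 > n2 then true
  else
    let m := |n3|
    decide (PySem.Int.floordiv n2 m - PySem.Int.floordiv (n1 - 1) m = 0)

-- ===== PRECONDITION & SPEC =====
-- Pre_ excludes exactly the inputs where Python A raises ZeroDivisionError:
-- n3 = 0 with a nonempty range n1 ≤ n2 (B raises there too).
def Pre_ismultiple (n1 : Int) (n2 : Int) (n3 : Int) : Prop := n3 ≠ 0 ∨ n2 < n1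
instance (n1 : Int) (n2 : Int) (n3 : Int) : Decidable (Pre_ismultiple n1 n2 n3) := by unfold Pre_ismultiple; infer_instance
def pvWitness_ismultiple : Int × Int × Int := (1, 10, 3)
def Spec_ismultiple (n1 : Int) (n2 : Int) (n3 : Int) (out : Bool) : Prop := out = ismultiple_alt n1 n2 n3
instance (n1 : Int) (n2 : Int) (n3 : Int) (out : Bool) : Decidable (Spec_ismultiple n1 n2 n3 out) := by unfold Spec_ismultiple; infer_instance

-- ===== CLAIM (what is proved, stated in full; the proofs are below) =====
def Claim_equal_ismultiple : Prop := ∀ (n1 : Int) (n2 : Int) (n3 : Int), Dom_ismultiple n1 n2 n3 → Pre_ismultiple n1 n2 n3 → Spec_ismultiple n1 n2 n3 (ismultiple n1 n2 n3)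

-- ===== LEMMAS AND PROOFS =====

-- For a positive modulus, floordiv steps by 1 exactly at multiples.
theorem fdiv_step (m a : Int) (hm : 0 < m) :
    PySem.Int.floordiv a m - PySem.Int.floordiv (a - 1) m = if m ∣ a then 1 else 0 := by
  rw [PySem.Int.floordiv_eq_ediv_of_pos hm, PySem.Int.floordiv_eq_ediv_of_pos hm]
  rcases em (m ∣ a) with h | h
  · obtain ⟨q, rfl⟩ := h
    have e1 : m * q / m = q := Int.mul_ediv_cancel_left _ (by omega)
    have e2 : m * q - 1 = (m - 1) + (q - 1) * m := by ring
    have e3 : (m * q - 1) / m = q - 1 := by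
      rw [e2, Int.add_mul_ediv_right _ _ (by omega), Int.ediv_eq_zero_of_lt (by omega) (by omega)]
      ring
    rw [if_pos ⟨q, rfl⟩, e1, e3]; ring
  · have h0 : 0 ≤ a % m := Int.emod_nonneg a (by omega)
    have h2 : a % m < m := Int.emod_lt_of_pos a hm
    have h3 : a % m ≠ 0 := fun hc => h (Int.dvd_of_emod_eq_zero hc)
    have key : m * (a / m) + a % m = a := Int.mul_ediv_add_emod a m
    have kc : m * (a / m) = (a / m) * m := mul_comm _ _
    have e1 : a - 1 = (a % m - 1) + (a / m) * m := by omega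
    have e3 : (a - 1) / m = a / m := by
      rw [e1, Int.add_mul_ediv_right _ _ (by omega), Int.ediv_eq_zero_of_lt (by omega) (by omega)]
      ring
    rw [if_neg h, e3]; ring

-- A's counting loop over range(a, a+k) computes the closed-form count of multiples of n3.
theorem count_loop (n3 : Int) (hn : n3 ≠ 0) : ∀ (k : Nat) (a c : Int),
    (PySem.List.pyRange a (a + k) 1).foldl
      (fun c i => if PySem.Int.mod i n3 = 0 then c + 1 else c) c
    = c + (PySem.Int.floordiv (a + k - 1) |n3| - PySem.Int.floordiv (a - 1) |n3|) := by
  intro k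
  induction k with
  | zero =>
    intro a c
    rw [show a + ((0 : Nat) : Int) = a by simp, PySem.List.pyRange_one_eq_nil (le_refl a)]
    simp
  | succ k ih =>
    intro a c
    have hm : (0 : Int) < |n3| := by positivity
    rw [PySem.List.pyRange_one_cons (by omega), List.foldl_cons]
    have hrw : a + (↑(k + 1) : Int) = (a + 1) + (k : Int) := by push_cast; ring
    rw [hrw, ih (a + 1) _]
    have hdvd : (PySem.Int.mod a n3 = 0) ↔ |n3| ∣ a := by
      rw [PySem.Int.mod_eq_zero_iff_dvd, abs_dvd]
    have hstep := fdiv_step |n3| a hm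
    rw [show a + 1 - 1 = a from by ring]
    by_cases h : |n3| ∣ a
    · rw [if_pos (hdvd.mpr h)]; rw [if_pos h] at hstep; omega
    · rw [if_neg (fun hc => h (hdvd.mp hc))]; rw [if_neg h] at hstep; omega

-- ===== VERDICT (by name: the statement is the Claim_ definition above) =====
theorem ismultiple_spec : Claim_equal_ismultiple := by
  intro n1 n2 n3 _ hpre
  unfold Spec_ismultiple ismultiple ismultiple_alt
  by_cases hle : n1 > n2
  · rw [if_pos hle]
    simp [PySem.List.pyRange_one_eq_nil (show n2 + 1 ≤ n1 by omega)]
  · rw [if_neg hle]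
    have hn : n3 ≠ 0 := by rcases hpre with h | h; exact h; omega
    have hk : n2 + 1 = n1 + ((n2 + 1 - n1).toNat : Int) := by omega
    rw [hk, count_loop n3 hn ((n2 + 1 - n1).toNat) n1 0]
    have he : n1 + ((n2 + 1 - n1).toNat : Int) - 1 = n2 := by omega
    rw [he]
    by_cases hz : PySem.Int.floordiv n2 |n3| - PySem.Int.floordiv (n1 - 1) |n3| = 0
    · simp [hz]
    · simp only [zero_add]
      rw [if_neg hz, decide_eq_false hz]
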